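-- pv_equiv track=rewrite | github.com/andywu42/onex_change_control | src/onex_change_control/scripts/check_migration_conflicts.py | _merge_schemas
-- ===== SOURCE A (Python) =====
-- def _merge_schemas(
--     repo_schemas: dict[str, dict[str, set[str]]],
-- ) -> tuple[dict[str, set[str]], set[str]]:
--     """Merge per-repo schemas, detecting ambiguous tables."""
--     table_columns: dict[str, set[str]] = {}
--     ambiguous_tables: set[str] = set()
--
--     table_to_repos: dict[str, dict[str, set[str]]] = {}
--     for repo_name, schemas in repo_schemas.items():
--         for tname, cols in schemas.items():
--             if tname not in table_to_repos:
--                 table_to_repos[tname] = {}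
--             table_to_repos[tname][repo_name] = cols
--
--     for tname, repo_cols in table_to_repos.items():
--         if len(repo_cols) > 1:
--             col_sets = list(repo_cols.values())
--             if not all(c == col_sets[0] for c in col_sets):
--                 ambiguous_tables.add(tname)
--                 continue
--         merged: set[str] = set()
--         for cols in repo_cols.values():
--             merged |= cols
--         table_columns[tname] = merged
--
--     return table_columns, ambiguous_tables
-- ===== SOURCE B (Python) =====
-- def _merge_schemas(repo_schemas):
--     """One pass over all (table, cols) occurrences: remember the first-seen
--     column set per table, collapse it to None on any disagreement, then split."""
--     seen = {}  # tname -> first-seen column set, or None once a conflict is found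
--     for schemas in repo_schemas.values():
--         for tname, cols in schemas.items():
--             if tname not in seen:
--                 seen[tname] = set(cols)
--             elif seen[tname] is not None and seen[tname] != cols:
--                 seen[tname] = None
--     table_columns = {t: c for t, c in seen.items() if c is not None}
--     ambiguous_tables = {t for t, c in seen.items() if c is None}
--     return table_columns, ambiguous_tables
-- ===== Notes on version B (the rewrite author's own statement) =====
-- stated objective: simpler
-- what changed: Drops A's intermediate table->(repo->cols) index and its second judging/union phase: B makes a single pass over all (table, cols) occurrences, keeping the first-seen column set per table and collapsing it to None on any disagreement, then splits that one dict into the two results.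
import Mathlib
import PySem

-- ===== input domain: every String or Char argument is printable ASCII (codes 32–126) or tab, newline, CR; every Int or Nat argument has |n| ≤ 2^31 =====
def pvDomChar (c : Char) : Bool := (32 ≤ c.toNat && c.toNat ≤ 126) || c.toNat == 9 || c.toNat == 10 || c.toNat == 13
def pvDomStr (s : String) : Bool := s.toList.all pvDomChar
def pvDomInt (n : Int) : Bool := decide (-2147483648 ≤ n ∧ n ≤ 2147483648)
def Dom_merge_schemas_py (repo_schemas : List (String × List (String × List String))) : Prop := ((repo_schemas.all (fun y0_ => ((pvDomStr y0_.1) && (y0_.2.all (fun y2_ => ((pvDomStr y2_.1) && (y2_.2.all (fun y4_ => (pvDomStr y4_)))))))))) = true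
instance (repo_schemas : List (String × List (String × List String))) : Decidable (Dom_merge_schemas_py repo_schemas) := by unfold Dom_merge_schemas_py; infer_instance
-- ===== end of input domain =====

-- B replaces A's two-phase group-then-judge merge (table->repo->cols index, then scan/union)
-- by a single pass keeping the first-seen column set per table (None once conflicting); simpler, same result.


-- ===== PORT A =====
def merge_schemas_py (repo_schemas : List (String × List (String × List String))) : (List (String × List String)) × List String :=
  -- table_to_repos: for repo_name, schemas …: for tname, cols …
  let table_to_repos : PySem.Dict String (PySem.Dict String (List String)) :=
    repo_schemas.foldl (fun ttr p =>
      p.2.foldl (fun ttr q =>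
        let ttr' := if ttr.contains q.1 then ttr else ttr.insert q.1 PySem.Dict.empty
        ttr'.insert q.1 ((ttr'.getD q.1 PySem.Dict.empty).insert p.1 q.2)) ttr)
      PySem.Dict.empty
  -- for tname, repo_cols in table_to_repos.items() …
  let st : PySem.Dict String (List String) × PySem.Set String :=
    table_to_repos.items.foldl (fun st p =>
      if decide (1 < p.2.size) && !(p.2.values.all (fun c => PySem.Set.equal c (p.2.values.headD []))) then
        (st.1, PySem.Set.add st.2 p.1)
      else
        (st.1.insert p.1 (p.2.values.foldl (fun m c => PySem.Set.union m c) PySem.Set.empty), st.2))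
      (PySem.Dict.empty, PySem.Set.empty)
  (st.1.items, st.2)

-- ===== PORT B =====
def merge_schemas_py_alt (repo_schemas : List (String × List (String × List String))) : (List (String × List String)) × List String :=
  let seen : PySem.Dict String (Option (List String)) :=
    repo_schemas.foldl (fun seen p =>
      p.2.foldl (fun seen q =>
        if !(seen.contains q.1) then seen.insert q.1 (some (PySem.Set.ofList q.2))
        else
          match seen.getD q.1 none with
          | some s => if !(PySem.Set.equal s q.2) then seen.insert q.1 none else seen
          | none => seen) seen)
      PySem.Dict.empty
  (seen.items.filterMap (fun p => p.2.map (fun c => (p.1, c))),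
   seen.items.filterMap (fun p => match p.2 with | none => some p.1 | some _ => none))

-- ===== PRECONDITION & SPEC =====
-- Pre_ is the representation invariant of the dict-typed input (a Python dict cannot hold a
-- duplicate key): repo names are pairwise distinct and, within each repo, table names are too.
def Pre_merge_schemas_py (repo_schemas : List (String × List (String × List String))) : Prop :=
  (repo_schemas.map Prod.fst).Nodup ∧ ∀ p ∈ repo_schemas, (p.2.map Prod.fst).Nodup
instance (repo_schemas : List (String × List (String × List String))) : Decidable (Pre_merge_schemas_py repo_schemas) := by unfold Pre_merge_schemas_py; infer_instance

def pvWitness_merge_schemas_py : (List (String × List (String × List String))) :=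
  [("r1", [("t", ["a"]), ("u", ["a", "b"])]), ("r2", [("t", ["a"]), ("u", ["c"])])]

def Spec_merge_schemas_py (repo_schemas : List (String × List (String × List String))) (out : (List (String × List String)) × List String) : Prop := out = merge_schemas_py_alt repo_schemas
instance (repo_schemas : List (String × List (String × List String))) (out : (List (String × List String)) × List String) : Decidable (Spec_merge_schemas_py repo_schemas out) := by unfold Spec_merge_schemas_py; infer_instance

-- ===== CLAIM (what is proved, stated in full; the proofs are below) =====
def Claim_equal_merge_schemas_py : Prop := ∀ (repo_schemas : List (String × List (String × List String))), Dom_merge_schemas_py repo_schemas → Pre_merge_schemas_py repo_schemas → Spec_merge_schemas_py repo_schemas (merge_schemas_py repo_schemas)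

-- ===== LEMMAS AND PROOFS =====

-- the flattened stream of (repo_name, tname, cols) occurrences both programs traverse
def pvOcc (rs : List (String × List (String × List String))) : List (String × String × List String) :=
  rs.flatMap (fun p => p.2.map (fun q => (p.1, q.1, q.2)))

-- A's inner-loop body, as one step on the flattened stream
def pvStepA (d : PySem.Dict String (PySem.Dict String (List String))) (o : String × String × List String) : PySem.Dict String (PySem.Dict String (List String)) :=
  d.modify o.2.1 PySem.Dict.empty (fun i => i.insert o.1 o.2.2)

-- B's inner-loop body, as one step on the flattened stream
def pvStepB (d : PySem.Dict String (Option (List String))) (o : String × String × List String) : PySem.Dict String (Option (List String)) :=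
  match d.get? o.2.1 with
  | none => d.insert o.2.1 (some (PySem.Set.ofList o.2.2))
  | some none => d
  | some (some s) => if PySem.Set.equal s o.2.2 then d else d.insert o.2.1 none

-- B's per-table verdict step on the column sets of one table
def pvStepV (v : Option (Option (List String))) (c : List String) : Option (Option (List String)) :=
  match v with
  | none => some (some (PySem.Set.ofList c))
  | some none => some none
  | some (some s) => if PySem.Set.equal s c then v else some none

lemma pv_foldl_flatOcc {α : Type} (step : α → String × String × List String → α) :
    ∀ (rs : List (String × List (String × List String))) (init : α),
      rs.foldl (fun a p => p.2.foldl (fun a q => step a (p.1, q.1, q.2)) a) init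
        = (pvOcc rs).foldl step init := by
  intro rs
  induction rs with
  | nil => intro init; rfl
  | cons p rs ih =>
    intro init
    simp only [pvOcc, List.flatMap_cons, List.foldl_cons, List.foldl_append, List.foldl_map]
    exact ih _

lemma pvStepA_eq (d : PySem.Dict String (PySem.Dict String (List String))) (o : String × String × List String) :
    (let d' := if d.contains o.2.1 then d else d.insert o.2.1 PySem.Dict.empty
     d'.insert o.2.1 ((d'.getD o.2.1 PySem.Dict.empty).insert o.1 o.2.2)) = pvStepA d o := by
  by_cases hc : d.contains o.2.1
  · simp [hc, pvStepA, PySem.Dict.modify]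
  · simp only [Bool.not_eq_true] at hc
    simp [hc, pvStepA, PySem.Dict.modify, PySem.Dict.getD_insert_self, PySem.Dict.insert_insert_self,
      PySem.Dict.getD_of_not_contains d _ hc]

lemma pvStepB_eq (d : PySem.Dict String (Option (List String))) (o : String × String × List String) :
    (if !(d.contains o.2.1) then d.insert o.2.1 (some (PySem.Set.ofList o.2.2))
     else
       match d.getD o.2.1 none with
       | some s => if !(PySem.Set.equal s o.2.2) then d.insert o.2.1 none else d
       | none => d) = pvStepB d o := by
  rcases hg : d.get? o.2.1 with _ | v
  · have hc : d.contains o.2.1 = false := by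
      rw [PySem.Dict.contains_eq_isSome_get?, hg]; rfl
    simp [pvStepB, hg, hc]
  · have hc : d.contains o.2.1 = true := by
      rw [PySem.Dict.contains_eq_isSome_get?, hg]; rfl
    have hd : d.getD o.2.1 none = v := by
      rw [PySem.Dict.getD_eq_get?_getD, hg]; rfl
    rcases v with _ | s
    · simp [pvStepB, hg, hc, hd]
    · simp only [pvStepB, hg, hc, hd, Bool.not_true, Bool.false_eq_true, if_false]
      by_cases he : PySem.Set.equal s o.2.2 <;> simp [he]

lemma pv_getD_foldA (occ : List (String × String × List String)) :
    ∀ (d : PySem.Dict String (PySem.Dict String (List String))) (t : String),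
      ((occ.foldl pvStepA d).getD t PySem.Dict.empty)
        = (occ.filter (fun o => o.2.1 == t)).foldl (fun i o => i.insert o.1 o.2.2) (d.getD t PySem.Dict.empty) := by
  induction occ with
  | nil => intro d t; rfl
  | cons o occ ih =>
    intro d t
    by_cases ht : o.2.1 = t
    · rw [List.filter_cons_of_pos (by simp [ht]), List.foldl_cons, List.foldl_cons, ih]
      congr 1
      rw [pvStepA, PySem.Dict.getD_modify, if_pos ht.symm, ht]
    · rw [List.filter_cons_of_neg (by simp [ht]), List.foldl_cons, ih]
      congr 1
      rw [pvStepA, PySem.Dict.getD_modify, if_neg (fun h => ht h.symm)]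

lemma pv_keys_foldA (occ : List (String × String × List String)) :
    ((occ.foldl pvStepA PySem.Dict.empty).keys) = PySem.Set.ofList (occ.map (fun o => o.2.1)) := by
  have := PySem.Dict.keys_foldl_modify_key occ (fun o => o.2.1) (PySem.Dict.empty : PySem.Dict String (List String))
      (fun _ o => fun i => i.insert o.1 o.2.2) PySem.Dict.empty
  simpa [pvStepA, PySem.Dict.keys_empty] using this

lemma pv_keys_stepB (d : PySem.Dict String (Option (List String))) (o : String × String × List String) :
    (pvStepB d o).keys = PySem.Set.add d.keys o.2.1 := by
  rcases hg : d.get? o.2.1 with _ | (_ | s)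
  · have hc : d.contains o.2.1 = false := by rw [PySem.Dict.contains_eq_isSome_get?, hg]; rfl
    have hm : o.2.1 ∉ d.keys := by
      intro hm
      rw [← PySem.Dict.contains_iff_mem_keys] at hm
      simp [hc] at hm
    simp only [pvStepB, hg]
    rw [PySem.Dict.keys_insert_of_not_contains _ _ hc, PySem.Set.add, if_neg (by simpa using hm)]
  · have hc : d.contains o.2.1 = true := by rw [PySem.Dict.contains_eq_isSome_get?, hg]; rfl
    have hm : o.2.1 ∈ d.keys := (PySem.Dict.contains_iff_mem_keys _ _).mp hc
    simp only [pvStepB, hg]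
    rw [PySem.Set.add, if_pos (by simpa using hm)]
  · have hc : d.contains o.2.1 = true := by rw [PySem.Dict.contains_eq_isSome_get?, hg]; rfl
    have hm : o.2.1 ∈ d.keys := (PySem.Dict.contains_iff_mem_keys _ _).mp hc
    simp only [pvStepB, hg]
    by_cases he : PySem.Set.equal s o.2.2
    · rw [if_pos he, PySem.Set.add, if_pos (by simpa using hm)]
    · rw [if_neg he, PySem.Dict.keys_insert_of_contains _ _ hc, PySem.Set.add, if_pos (by simpa using hm)]

lemma pv_keys_foldB (occ : List (String × String × List String)) :
    ∀ (d : PySem.Dict String (Option (List String))),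
      ((occ.foldl pvStepB d).keys) = PySem.Set.update d.keys (occ.map (fun o => o.2.1)) := by
  induction occ with
  | nil => intro d; rfl
  | cons o occ ih =>
    intro d
    rw [List.foldl_cons, ih, List.map_cons, PySem.Set.update_cons, pv_keys_stepB]

lemma pv_get?_foldB (occ : List (String × String × List String)) :
    ∀ (d : PySem.Dict String (Option (List String))) (t : String),
      ((occ.foldl pvStepB d).get? t)
        = ((occ.filter (fun o => o.2.1 == t)).map (fun o => o.2.2)).foldl pvStepV (d.get? t) := by
  induction occ with
  | nil => intro d t; rfl
  | cons o occ ih =>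
    intro d t
    by_cases ht : o.2.1 = t
    · rw [List.filter_cons_of_pos (by simp [ht]), List.foldl_cons, List.map_cons, List.foldl_cons, ih]
      congr 1
      subst ht
      rcases hg : d.get? o.2.1 with _ | (_ | s)
      · simp only [pvStepB, hg, pvStepV]
        rw [PySem.Dict.get?_insert_self]
      · simp only [pvStepB, hg, pvStepV]
      · simp only [pvStepB, hg, pvStepV]
        by_cases he : PySem.Set.equal s o.2.2
        · rw [if_pos he, if_pos he, hg]
        · rw [if_neg he, if_neg he, PySem.Dict.get?_insert_self]
    · rw [List.filter_cons_of_neg (by simp [ht]), List.foldl_cons, ih]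
      congr 1
      rcases hg : d.get? o.2.1 with _ | (_ | s)
      · simp only [pvStepB, hg]
        exact PySem.Dict.get?_insert_of_ne _ _ (Ne.symm ht)
      · simp only [pvStepB, hg]
      · simp only [pvStepB, hg]
        by_cases he : PySem.Set.equal s o.2.2
        · rw [if_pos he]
        · rw [if_neg he]
          exact PySem.Dict.get?_insert_of_ne _ _ (Ne.symm ht)

lemma pv_vstay (tl : List (List String)) : tl.foldl pvStepV (some none) = some none := by
  induction tl with
  | nil => rfl
  | cons c tl ih => rw [List.foldl_cons]; exact ih

lemma pv_vrun (tl : List (List String)) (s : List String) :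
    tl.foldl pvStepV (some (some s))
      = (if tl.all (fun c => PySem.Set.equal s c) then some (some s) else some none) := by
  induction tl with
  | nil => rfl
  | cons c tl ih =>
    rw [List.foldl_cons, List.all_cons]
    by_cases he : PySem.Set.equal s c
    · simp only [pvStepV, he, if_pos, Bool.true_and]
      exact ih
    · simp only [pvStepV, he, Bool.false_and, if_false, Bool.false_eq_true]
      exact pv_vstay tl

lemma pv_vfold_char (h : List String) (tl : List (List String)) :
    (h :: tl).foldl pvStepV none
      = (if tl.all (fun c => PySem.Set.equal (PySem.Set.ofList h) c) then some (some (PySem.Set.ofList h)) else some none) := by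
  rw [List.foldl_cons]
  show tl.foldl pvStepV (some (some (PySem.Set.ofList h))) = _
  exact pv_vrun tl _

lemma pv_phase2 (B : String → Bool) (M : String → List String) :
    ∀ (names : List String), names.Nodup →
      (names.foldl (fun st t => if B t then (st.1, PySem.Set.add st.2 t) else (st.1.insert t (M t), st.2))
        ((PySem.Dict.empty : PySem.Dict String (List String)), (PySem.Set.empty : PySem.Set String)))
      = (PySem.Dict.mk ((names.filter (fun t => !(B t))).map (fun t => (t, M t))), names.filter B) := by
  intro names
  induction names using List.reverseRecOn with
  | nil => intro _; rfl
  | append_singleton names t ih =>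
    intro hnd
    have hnd' : names.Nodup := (List.nodup_append.mp hnd).1
    have htn : t ∉ names := by
      intro hmem
      exact (List.nodup_append.mp hnd).2.2 t hmem t (List.mem_singleton_self t) rfl
    rw [List.foldl_append, ih hnd', List.foldl_cons, List.foldl_nil]
    by_cases hb : B t
    · rw [if_pos hb, List.filter_append, List.filter_append]
      have h1 : List.filter (fun t => !(B t)) [t] = [] := by simp [hb]
      have h2 : List.filter B [t] = [t] := by simp [hb]
      rw [h1, h2, List.append_nil]
      congr 1
      rw [PySem.Set.add, if_neg]
      simp only [PySem.Set.contains_eq_listContains]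
      intro hc
      have : t ∈ names.filter B := by simpa using hc
      exact htn (List.mem_of_mem_filter this)
    · rw [if_neg hb, List.filter_append, List.filter_append]
      have h1 : List.filter (fun t => !(B t)) [t] = [t] := by simp [hb]
      have h2 : List.filter B [t] = [] := by simp [hb]
      rw [h1, h2, List.append_nil]
      congr 1
      have hc : (PySem.Dict.mk ((names.filter (fun t => !(B t))).map (fun t => (t, M t)))).contains t = false := by
        rw [PySem.Dict.contains_eq_decide_mem_keys]
        simp only [decide_eq_false_iff_not]
        intro hmem
        simp only [PySem.Dict.keys, List.map_map, List.mem_map] at hmem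
        obtain ⟨u, hu, he⟩ := hmem
        have : u = t := by simpa using he
        subst this
        exact htn (List.mem_of_mem_filter hu)
      apply PySem.Dict.ext
      rw [PySem.Dict.items_insert_of_not_contains _ _ hc]
      simp

lemma pv_equal_swap (a b : List String) :
    PySem.Set.equal a b = PySem.Set.equal (PySem.Set.ofList b) a := by
  by_cases h : PySem.Set.equal a b
  · rw [h]
    have := (PySem.Set.equal_iff a b).mp h
    symm
    rw [PySem.Set.equal_iff]
    intro x
    rw [PySem.Set.mem_ofList]
    exact (this x).symm
  · simp only [Bool.not_eq_true] at h
    rw [h]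
    symm
    rw [← Bool.not_eq_true, PySem.Set.equal_iff]
    intro hall
    rw [← Bool.not_eq_true, PySem.Set.equal_iff] at h
    apply h
    intro x
    rw [← PySem.Set.mem_ofList b x]
    exact (hall x).symm

lemma pv_union_all_eq (h : List String) (tl : List (List String))
    (hall : tl.all (fun c => PySem.Set.equal (PySem.Set.ofList h) c) = true) :
    (h :: tl).foldl (fun m c => PySem.Set.union m c) PySem.Set.empty = PySem.Set.ofList h := by
  rw [List.foldl_cons]
  have h0 : PySem.Set.union PySem.Set.empty h = PySem.Set.ofList h := by
    rw [PySem.Set.union]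
    exact PySem.Set.update_empty h
  rw [h0]
  rw [List.all_eq_true] at hall
  induction tl with
  | nil => rfl
  | cons c tl ih =>
    rw [List.foldl_cons]
    have hc : PySem.Set.union (PySem.Set.ofList h) c = PySem.Set.ofList h := by
      rw [PySem.Set.union, PySem.Set.update_eq_append_filter]
      have : (PySem.Set.ofList c).filter (fun y => !(PySem.Set.ofList h).contains y) = [] := by
        rw [List.filter_eq_nil_iff]
        intro y hy
        have heq := (PySem.Set.equal_iff _ _).mp (hall c (by simp))
        have : y ∈ PySem.Set.ofList h := (heq y).mpr ((PySem.Set.mem_ofList c y).mp hy)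
        simp [PySem.Set.contains_eq_listContains, this]
      rw [this, List.append_nil]
    rw [hc]
    exact ih (fun x hx => hall x (by simp [hx]))

lemma pv_occ_fst {rs : List (String × List (String × List String))} {o : String × String × List String}
    (h : o ∈ pvOcc rs) : o.1 ∈ rs.map Prod.fst := by
  rw [pvOcc, List.mem_flatMap] at h
  obtain ⟨p, hp, ho⟩ := h
  rw [List.mem_map] at ho
  obtain ⟨q, hq, he⟩ := ho
  subst he
  exact List.mem_map.mpr ⟨p, hp, rfl⟩

lemma pv_nodup_of_len_le_one {l : List String} (h : l.length ≤ 1) : l.Nodup := by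
  match l, h with
  | [], _ => exact List.nodup_nil
  | [a], _ => exact List.nodup_singleton a

lemma pv_repoNodup (rs : List (String × List (String × List String)))
    (h1 : (rs.map Prod.fst).Nodup) (h2 : ∀ p ∈ rs, (p.2.map Prod.fst).Nodup) (t : String) :
    (((pvOcc rs).filter (fun o => o.2.1 == t)).map (fun o => o.1)).Nodup := by
  induction rs with
  | nil => simp [pvOcc]
  | cons p rs ih =>
    have h1' : (rs.map Prod.fst).Nodup := (List.nodup_cons.mp (by simpa using h1)).2
    have hp1 : p.1 ∉ rs.map Prod.fst := (List.nodup_cons.mp (by simpa using h1)).1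
    have hblock : ((p.2.map (fun q => (p.1, q.1, q.2))).filter (fun o => o.2.1 == t)).length ≤ 1 := by
      rw [List.filter_map, List.length_map, ← List.countP_eq_length_filter]
      have hcnt : List.countP ((fun o => o.2.1 == t) ∘ (fun q => (p.1, q.1, q.2))) p.2
          = List.count t (p.2.map Prod.fst) := by
        rw [List.count, List.countP_map]
        rfl
      rw [hcnt]
      exact List.nodup_iff_count_le_one.mp (h2 p (by simp)) t
    rw [pvOcc, List.flatMap_cons, List.filter_append, List.map_append, List.nodup_append]
    refine ⟨?_, ?_, ?_⟩
    · exact pv_nodup_of_len_le_one (by rw [List.length_map]; exact hblock)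
    · exact ih h1' (fun q hq => h2 q (by simp [hq]))
    · intro a ha b hb
      have ha1 : a = p.1 := by
        rw [List.mem_map] at ha
        obtain ⟨o, ho, he⟩ := ha
        rw [List.mem_filter, List.mem_map] at ho
        obtain ⟨⟨q, hq, hqe⟩, _⟩ := ho
        subst hqe
        exact he.symm
      have hb1 : b ∈ rs.map Prod.fst := by
        rw [List.mem_map] at hb
        obtain ⟨o, ho, he⟩ := hb
        subst he
        exact pv_occ_fst (List.mem_of_mem_filter ho)
      subst ha1
      intro he
      subst he
      exact hp1 hb1

lemma pv_equal_refl (a : List String) : PySem.Set.equal a a = true := by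
  rw [PySem.Set.equal_iff]; intro x; exact Iff.rfl

-- the per-table fact: A's judge-and-union of the column sets of one table agrees with B's verdict
lemma pv_perElem (hd : List String) (tl : List (List String)) :
    (if (decide (1 < ((hd :: tl) : List (List String)).length) && !((hd :: tl).all (fun c => PySem.Set.equal c ((hd :: tl).headD [])))) then
      (((hd :: tl).foldl pvStepV none).getD none = none)
    else
      (((hd :: tl).foldl pvStepV none).getD none = some ((hd :: tl).foldl (fun m c => PySem.Set.union m c) PySem.Set.empty))) := by
  have hall : ((hd :: tl).all (fun c => PySem.Set.equal c ((hd :: tl).headD [])))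
      = tl.all (fun c => PySem.Set.equal (PySem.Set.ofList hd) c) := by
    simp only [List.headD_cons, List.all_cons, pv_equal_refl, Bool.true_and]
    exact congrArg (List.all tl) (funext (fun c => pv_equal_swap c hd))
  rw [hall, pv_vfold_char]
  by_cases hc : tl.all (fun c => PySem.Set.equal (PySem.Set.ofList hd) c)
  · rw [hc]
    simp only [Bool.not_true, Bool.and_false, Bool.false_eq_true, if_false, if_true, Option.getD_some]
    exact congrArg some (pv_union_all_eq hd tl hc).symm
  · have hc' : tl.all (fun c => PySem.Set.equal (PySem.Set.ofList hd) c) = false := by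
      simpa using hc
    rw [hc']
    rcases tl with _ | ⟨c, tl'⟩
    · simp at hc'
    · simp only [Bool.not_false, Bool.and_true, Bool.false_eq_true, if_false, List.length_cons]
      rw [if_pos (by simp)]
      rfl

lemma pv_assemble (B : String → Bool) (M : String → List String) (v : String → Option (List String)) :
    ∀ names : List String, (∀ t ∈ names, if B t then v t = none else v t = some (M t)) →
      (((names.filter (fun t => !(B t))).map (fun t => (t, M t)) = names.filterMap (fun t => (v t).map (fun c => (t, c))))
    ∧ (names.filter B = names.filterMap (fun t => match v t with | none => some t | some _ => none))) := by
  intro names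
  induction names with
  | nil => intro _; exact ⟨rfl, rfl⟩
  | cons t names ih =>
    intro h
    have ht := h t (by simp)
    obtain ⟨ih1, ih2⟩ := ih (fun u hu => h u (by simp [hu]))
    by_cases hb : B t
    · rw [if_pos hb] at ht
      constructor
      · simp only [List.filterMap_cons, ht]
        rw [List.filter_cons_of_neg (by simp [hb])]
        simpa using ih1
      · simp only [List.filterMap_cons, ht]
        rw [List.filter_cons_of_pos (by simp [hb])]
        simpa using ih2
    · rw [if_neg hb] at ht
      constructor
      · simp only [List.filterMap_cons, ht, Option.map_some]
        rw [List.filter_cons_of_pos (by simp [hb]), List.map_cons]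
        simpa using ih1
      · simp only [List.filterMap_cons, ht]
        rw [List.filter_cons_of_neg (by simp [hb])]
        simpa using ih2

-- ===== VERDICT (by name: the statement is the Claim_ definition above) =====
theorem merge_schemas_py_spec : Claim_equal_merge_schemas_py := by
  intro rs _hdom hpre
  obtain ⟨h1, h2⟩ := hpre
  unfold Spec_merge_schemas_py
  -- both nested loops, flattened to the occurrence stream
  have hAfold : (rs.foldl (fun ttr p =>
        p.2.foldl (fun ttr q =>
          let ttr' := if ttr.contains q.1 then ttr else ttr.insert q.1 PySem.Dict.empty
          ttr'.insert q.1 ((ttr'.getD q.1 PySem.Dict.empty).insert p.1 q.2)) ttr)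
        PySem.Dict.empty)
      = (pvOcc rs).foldl pvStepA PySem.Dict.empty := by
    rw [← pv_foldl_flatOcc pvStepA rs PySem.Dict.empty]
    congr 1
    funext a p
    congr 1
    funext b q
    exact pvStepA_eq b (p.1, q.1, q.2)
  have hBfold : (rs.foldl (fun seen p =>
        p.2.foldl (fun seen q =>
          if !(seen.contains q.1) then seen.insert q.1 (some (PySem.Set.ofList q.2))
          else
            match seen.getD q.1 none with
            | some s => if !(PySem.Set.equal s q.2) then seen.insert q.1 none else seen
            | none => seen) seen)
        PySem.Dict.empty)
      = (pvOcc rs).foldl pvStepB PySem.Dict.empty := by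
    rw [← pv_foldl_flatOcc pvStepB rs PySem.Dict.empty]
    congr 1
    funext a p
    congr 1
    funext b q
    exact pvStepB_eq b (p.1, q.1, q.2)
  have hnames : ((pvOcc rs).foldl pvStepA PySem.Dict.empty).keys
      = PySem.Set.ofList ((pvOcc rs).map (fun o => o.2.1)) := pv_keys_foldA (pvOcc rs)
  have hnnd : (PySem.Set.ofList ((pvOcc rs).map (fun o => o.2.1))).Nodup := PySem.Set.nodup_ofList _
  have hAitems : ((pvOcc rs).foldl pvStepA PySem.Dict.empty).items
      = (PySem.Set.ofList ((pvOcc rs).map (fun o => o.2.1))).map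
          (fun t => (t, ((pvOcc rs).filter (fun o => o.2.1 == t)).foldl (fun i o => i.insert o.1 o.2.2) PySem.Dict.empty)) := by
    rw [PySem.Dict.items_eq_map_keys _ (hnames ▸ hnnd) PySem.Dict.empty, hnames]
    refine List.map_congr_left (fun t _ => ?_)
    rw [pv_getD_foldA (pvOcc rs) PySem.Dict.empty t]
    rw [PySem.Dict.getD_empty]
  have hBkeys : ((pvOcc rs).foldl pvStepB PySem.Dict.empty).keys
      = PySem.Set.ofList ((pvOcc rs).map (fun o => o.2.1)) := by
    rw [pv_keys_foldB (pvOcc rs) PySem.Dict.empty, PySem.Dict.keys_empty]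
    exact PySem.Set.update_empty _
  have hBitems : ((pvOcc rs).foldl pvStepB PySem.Dict.empty).items
      = (PySem.Set.ofList ((pvOcc rs).map (fun o => o.2.1))).map
          (fun t => (t, ((((pvOcc rs).filter (fun o => o.2.1 == t)).map (fun o => o.2.2)).foldl pvStepV none).getD none)) := by
    rw [PySem.Dict.items_eq_map_keys _ (hBkeys ▸ hnnd) none, hBkeys]
    refine List.map_congr_left (fun t _ => ?_)
    rw [PySem.Dict.getD_eq_get?_getD, pv_get?_foldB (pvOcc rs) PySem.Dict.empty t, PySem.Dict.get?_empty]
  -- evaluate both ports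
  have eA : merge_schemas_py rs
      = ((((pvOcc rs).foldl pvStepA PySem.Dict.empty).items.foldl (fun st p =>
            if decide (1 < p.2.size) && !(p.2.values.all (fun c => PySem.Set.equal c (p.2.values.headD []))) then
              (st.1, PySem.Set.add st.2 p.1)
            else
              (st.1.insert p.1 (p.2.values.foldl (fun m c => PySem.Set.union m c) PySem.Set.empty), st.2))
            (PySem.Dict.empty, PySem.Set.empty)).1.items,
         (((pvOcc rs).foldl pvStepA PySem.Dict.empty).items.foldl (fun st p =>
            if decide (1 < p.2.size) && !(p.2.values.all (fun c => PySem.Set.equal c (p.2.values.headD []))) then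
              (st.1, PySem.Set.add st.2 p.1)
            else
              (st.1.insert p.1 (p.2.values.foldl (fun m c => PySem.Set.union m c) PySem.Set.empty), st.2))
            (PySem.Dict.empty, PySem.Set.empty)).2) := by
    rw [← hAfold]; rfl
  have eB : merge_schemas_py_alt rs
      = (((pvOcc rs).foldl pvStepB PySem.Dict.empty).items.filterMap (fun p => p.2.map (fun c => (p.1, c))),
         ((pvOcc rs).foldl pvStepB PySem.Dict.empty).items.filterMap (fun p => match p.2 with | none => some p.1 | some _ => none)) := by
    rw [← hBfold]; rfl
  rw [eA, eB, hAitems, hBitems, List.foldl_map, List.filterMap_map, List.filterMap_map]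
  -- per-table data
  have hmain := pv_assemble
      (fun t => decide (1 < (((pvOcc rs).filter (fun o => o.2.1 == t)).foldl (fun i o => i.insert o.1 o.2.2) PySem.Dict.empty).size)
        && !((((pvOcc rs).filter (fun o => o.2.1 == t)).foldl (fun i o => i.insert o.1 o.2.2) PySem.Dict.empty).values.all
              (fun c => PySem.Set.equal c ((((pvOcc rs).filter (fun o => o.2.1 == t)).foldl (fun i o => i.insert o.1 o.2.2) PySem.Dict.empty).values.headD []))))
      (fun t => (((pvOcc rs).filter (fun o => o.2.1 == t)).foldl (fun i o => i.insert o.1 o.2.2) PySem.Dict.empty).values.foldl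
              (fun m c => PySem.Set.union m c) PySem.Set.empty)
      (fun t => ((((pvOcc rs).filter (fun o => o.2.1 == t)).map (fun o => o.2.2)).foldl pvStepV none).getD none)
      (PySem.Set.ofList ((pvOcc rs).map (fun o => o.2.1)))
      (by
        intro t ht
        beta_reduce
        have hvals : (((pvOcc rs).filter (fun o => o.2.1 == t)).foldl (fun i o => i.insert o.1 o.2.2) PySem.Dict.empty).items
            = ((pvOcc rs).filter (fun o => o.2.1 == t)).map (fun o => (o.1, o.2.2)) := by
          refine PySem.Dict.items_foldl_insert_fresh _ _ _ _ (fun a _ => PySem.Dict.contains_empty _) ?_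
          exact pv_repoNodup rs h1 h2 t
        have hv : (((pvOcc rs).filter (fun o => o.2.1 == t)).foldl (fun i o => i.insert o.1 o.2.2) PySem.Dict.empty).values
            = ((pvOcc rs).filter (fun o => o.2.1 == t)).map (fun o => o.2.2) := by
          rw [PySem.Dict.values, hvals, List.map_map]
          rfl
        have hs : (((pvOcc rs).filter (fun o => o.2.1 == t)).foldl (fun i o => i.insert o.1 o.2.2) PySem.Dict.empty).size
            = (((pvOcc rs).filter (fun o => o.2.1 == t)).map (fun o => o.2.2)).length := by
          rw [PySem.Dict.size, hvals, List.length_map, List.length_map]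
        have hne : ((pvOcc rs).filter (fun o => o.2.1 == t)).map (fun o => o.2.2) ≠ [] := by
          rw [PySem.Set.mem_ofList] at ht
          rw [List.mem_map] at ht
          obtain ⟨o, ho, hot⟩ := ht
          intro hnil
          rw [List.map_eq_nil_iff, List.filter_eq_nil_iff] at hnil
          exact hnil o ho (by simp [hot])
        rw [hv, hs]
        rcases hcl : ((pvOcc rs).filter (fun o => o.2.1 == t)).map (fun o => o.2.2) with _ | ⟨hd, tl⟩
        · exact absurd hcl hne
        · rw [hcl]
          exact pv_perElem hd tl)
  rw [pv_phase2 (fun t => decide (1 < (((pvOcc rs).filter (fun o => o.2.1 == t)).foldl (fun i o => i.insert o.1 o.2.2) PySem.Dict.empty).size)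
        && !((((pvOcc rs).filter (fun o => o.2.1 == t)).foldl (fun i o => i.insert o.1 o.2.2) PySem.Dict.empty).values.all
              (fun c => PySem.Set.equal c ((((pvOcc rs).filter (fun o => o.2.1 == t)).foldl (fun i o => i.insert o.1 o.2.2) PySem.Dict.empty).values.headD []))))
      (fun t => (((pvOcc rs).filter (fun o => o.2.1 == t)).foldl (fun i o => i.insert o.1 o.2.2) PySem.Dict.empty).values.foldl
              (fun m c => PySem.Set.union m c) PySem.Set.empty)
      (PySem.Set.ofList ((pvOcc rs).map (fun o => o.2.1))) hnnd]
  rw [Prod.mk.injEq]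
  refine ⟨?_, ?_⟩
  · simpa [Function.comp_def] using hmain.1
  · simpa [Function.comp_def] using hmain.2
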